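-- pv_equiv track=rewrite | github.com/hackthegist/problem-solving | Programmers/2019_카카오_코딩테스트/01.py | make_zip
-- ===== SOURCE A (Python) =====
-- def make_zip(s, l):
--     li = []
--     idx = 0
--
--     while len(s) > 0:
--         if len(s) >= l:
--             first = s[:l]
--             s = s[l:]
--         else:
--             first = s
--             s = []
--
--         if not li:
--             li.append([first, 1])
--         else:
--             if li[idx][0] == first:
--                 li[idx][1] += 1
--             else:
--                 li.append([first, 1])
--                 idx += 1
--
--     result = ""
--     for wc in li:
--         result += str(wc[1]) + wc[0]
--     return result.replace("1", "")
-- ===== SOURCE B (Python) =====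
-- def make_zip(s, l):
--     chunks = [s[i:i + l] for i in range(0, len(s), l)]
--     pieces = []
--     while chunks:
--         c = chunks.pop(0)
--         run = 1
--         while chunks and chunks[0] == c:
--             run += 1
--             chunks.pop(0)
--         pieces.append(str(run) + c)
--     return "".join(pieces).replace("1", "")
-- ===== Notes on version B (the rewrite author's own statement) =====
-- stated objective: simpler
-- what changed: A fuses chunking and counting in one while-loop that repeatedly reslices s and maintains a [chunk,count] list with an explicit index; B first builds the chunk list with a range comprehension and then run-length encodes it by consuming whole runs from the front, joining the pieces at the end.
-- outside the precondition, e.g. on make_zip('', 0): A returns '', B raises ValueError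
import Mathlib
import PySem

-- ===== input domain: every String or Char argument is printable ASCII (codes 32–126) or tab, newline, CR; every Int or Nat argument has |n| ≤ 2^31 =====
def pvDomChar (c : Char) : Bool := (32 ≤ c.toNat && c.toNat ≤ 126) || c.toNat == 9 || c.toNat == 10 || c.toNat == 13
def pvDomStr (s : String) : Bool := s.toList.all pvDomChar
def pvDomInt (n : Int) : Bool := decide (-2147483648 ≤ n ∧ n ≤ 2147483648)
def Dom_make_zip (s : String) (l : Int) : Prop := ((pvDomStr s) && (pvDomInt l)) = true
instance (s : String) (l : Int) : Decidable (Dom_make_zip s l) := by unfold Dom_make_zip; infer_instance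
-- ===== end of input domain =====

-- B replaces A's fused while-loop by two separate passes (chunk via a range comprehension, then run-length
-- group by consuming runs from the front); objective: simpler decomposition, same exact return value on Pre_.

-- ===== PORT A =====
-- A's while loop: state (s, li, idx); fuel = |s| suffices since each iteration with l ≥ 1 (inside Pre_) consumes ≥ 1 char.
def pvLoopA (fuel : Nat) (s : List Char) (l : Int) (li : List (List Char × Int)) (idx : Nat) :
    List (List Char × Int) :=
  match fuel with
  | 0 => li
  | fuel + 1 =>
    if s.length > 0 then
      -- first = s[:l], s = s[l:]  (or first = s, s = [] when len(s) < l)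
      let fs :=
        if (s.length : Int) ≥ l then
          (PySem.List.slice s none (some l), PySem.List.slice s (some l) none)
        else (s, ([] : List Char))
      let li' :=
        if li = [] then [(fs.1, (1 : Int))]
        else if (PySem.List.pyGetD li (idx : Int) ([], 0)).1 = fs.1 then
          PySem.List.pySetD li (idx : Int)
            ((PySem.List.pyGetD li (idx : Int) ([], 0)).1,
             (PySem.List.pyGetD li (idx : Int) ([], 0)).2 + 1)
        else li ++ [(fs.1, (1 : Int))]
      let idx' :=
        if li = [] then idx
        else if (PySem.List.pyGetD li (idx : Int) ([], 0)).1 = fs.1 then idx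
        else idx + 1
      pvLoopA fuel fs.2 l li' idx'
    else li

def make_zip (s : String) (l : Int) : String :=
  let cs := s.toList
  let li := pvLoopA cs.length cs l [] 0
  let result := li.foldl (fun r wc => r ++ PySem.Int.toChars wc.2 ++ wc.1) ([] : List Char)
  String.mk (PySem.Chars.replace result ['1'] [])

-- ===== PORT B =====
-- inner `while chunks and chunks[0] == c: run += 1; chunks.pop(0)` (run starts at 1 from `c = chunks.pop(0)`)
def pvInnerRun (c : List Char) : List (List Char) → Int × List (List Char)
  | [] => (1, [])
  | x :: t => if x = c then let p := pvInnerRun c t; (p.1 + 1, p.2) else (1, x :: t)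

-- termination helper for pvRuns (cited in its decreasing_by)
theorem pvInnerRun_length_le (c : List Char) (xs : List (List Char)) :
    (pvInnerRun c xs).2.length ≤ xs.length := by
  induction xs with
  | nil => simp [pvInnerRun]
  | cons x t ih => by_cases h : x = c <;> simp [pvInnerRun, h] <;> omega

-- outer `while chunks:` loop, building the pieces list
def pvRuns : List (List Char) → List (List Char)
  | [] => []
  | c :: rest =>
    let p := pvInnerRun c rest
    (PySem.Int.toChars p.1 ++ c) :: pvRuns p.2
  termination_by cs => cs.length
  decreasing_by simpa using Nat.lt_succ_of_le (pvInnerRun_length_le c rest)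

def make_zip_alt (s : String) (l : Int) : String :=
  let cs := s.toList
  let chunks := (PySem.List.pyRange 0 (cs.length : Int) l).map
    (fun i => PySem.List.slice cs (some i) (some (i + l)))
  String.mk (PySem.Chars.replace (PySem.Chars.join [] (pvRuns chunks)) ['1'] [])

-- ===== PRECONDITION & SPEC =====
-- Pre_ excludes l < 1 with nonempty s, where A loops forever (s[:l]/s[l:] never shrink s), and the corner
-- (s = "", l = 0), where A accidentally returns "" (the loop body never runs) while B's natural
-- range(0, 0, 0) raises ValueError.
def Pre_make_zip (s : String) (l : Int) : Prop := 1 ≤ l ∨ (s = "" ∧ l ≠ 0)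
instance (s : String) (l : Int) : Decidable (Pre_make_zip s l) := by unfold Pre_make_zip; infer_instance
def pvWitness_make_zip : String × Int := ("aabbab", 2)

def Spec_make_zip (s : String) (l : Int) (out : String) : Prop := out = make_zip_alt s l
instance (s : String) (l : Int) (out : String) : Decidable (Spec_make_zip s l out) := by unfold Spec_make_zip; infer_instance

-- ===== CLAIM (what is proved, stated in full; the proofs are below) =====
def Claim_equal_make_zip : Prop := ∀ (s : String) (l : Int), Dom_make_zip s l → Pre_make_zip s l → Spec_make_zip s l (make_zip s l)

-- ===== LEMMAS AND PROOFS =====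

-- the chunk list [s[0:l], s[l:2l], …] as a structural recursion (proof-side reference shape)
def pvChunks (s : List Char) (l : Int) : List (List Char) :=
  if h : s = [] ∨ l < 1 then [] else s.take l.toNat :: pvChunks (s.drop l.toNat) l
  termination_by s.length
  decreasing_by
    have hs : s ≠ [] := fun hn => h (Or.inl hn)
    have : 1 ≤ l.toNat := by omega
    cases s with
    | nil => exact absurd rfl hs
    | cons a t => simp; omega

-- run-length grouping with an open last group (c, k): the invariant shape of A's li
def pvAbsorb (c : List Char) (k : Int) : List (List Char) → List (List Char × Int)
  | [] => [(c, k)]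
  | x :: xs => if x = c then pvAbsorb c (k + 1) xs else (c, k) :: pvAbsorb x 1 xs

def pvGroups : List (List Char) → List (List Char × Int)
  | [] => []
  | c :: rest => pvAbsorb c 1 rest

theorem pvAbsorb_cons (c x : List Char) (k : Int) (xs : List (List Char)) :
    pvAbsorb c k (x :: xs) = if x = c then pvAbsorb c (k + 1) xs else (c, k) :: pvAbsorb x 1 xs := rfl

theorem pvGroups_cons (c : List Char) (rest : List (List Char)) :
    pvGroups (c :: rest) = pvAbsorb c 1 rest := rfl

theorem pvChunks_nil (l : Int) : pvChunks [] l = [] := by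
  rw [pvChunks]; simp

theorem pvChunks_cons (s : List Char) (l : Int) (hs : s ≠ []) (hl : 1 ≤ l) :
    pvChunks s l = s.take l.toNat :: pvChunks (s.drop l.toNat) l := by
  rw [pvChunks]; rw [dif_neg (by push_neg; exact ⟨hs, by omega⟩)]

-- one iteration of A's loop takes first = s.take l.toNat and leaves s.drop l.toNat, for any l ≥ 1
theorem pvFirst_eq (s : List Char) (l : Int) (hl : 1 ≤ l) :
    (if (s.length : Int) ≥ l then
        (PySem.List.slice s none (some l), PySem.List.slice s (some l) none)
      else (s, ([] : List Char))) = (s.take l.toNat, s.drop l.toNat) := by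
  by_cases h : (s.length : Int) ≥ l
  · rw [if_pos h, PySem.List.slice_to s (show (0:Int) ≤ l by omega),
      PySem.List.slice_from s (show (0:Int) ≤ l by omega)]
  · rw [if_neg h]
    have h1 : s.length < l.toNat := by omega
    rw [List.take_of_length_le (by omega), List.drop_eq_nil_of_le (by omega)]

theorem pvLoopA_absorb (fuel : Nat) : ∀ (s : List Char) (l : Int) (init : List (List Char × Int))
    (c : List Char) (k : Int), 1 ≤ l → s.length ≤ fuel →
    pvLoopA fuel s l (init ++ [(c, k)]) init.length = init ++ pvAbsorb c k (pvChunks s l) := by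
  induction fuel with
  | zero =>
    intro s l init c k hl hf
    have : s = [] := List.eq_nil_of_length_eq_zero (by omega)
    subst this
    simp [pvLoopA, pvChunks_nil, pvAbsorb]
  | succ fuel ih =>
    intro s l init c k hl hf
    cases s with
    | nil => simp [pvLoopA, pvChunks_nil, pvAbsorb]
    | cons a t =>
      rw [pvLoopA]
      rw [if_pos (by simp)]
      simp only [pvFirst_eq (a :: t) l hl]
      have hne : init ++ [(c, k)] ≠ [] := by simp
      rw [if_neg hne, if_neg hne]
      have hget : PySem.List.pyGetD (init ++ [(c, k)]) (init.length : Int) (([] : List Char), (0 : Int)) = (c, k) := by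
        rw [PySem.List.pyGetD_natCast]
        simp [List.getD_eq_getElem?_getD, List.getElem?_concat_length]
      rw [hget]
      have hfst : ((c, k).1 : List Char) = c := rfl
      have hsnd : ((c, k).2 : Int) = k := rfl
      rw [hfst, hsnd]
      have hdroplen : ((a :: t).drop l.toNat).length ≤ fuel := by
        simp only [List.length_drop]
        have : 1 ≤ l.toNat := by omega
        simp at hf ⊢
        omega
      by_cases hc : c = List.take l.toNat (a :: t)
      · rw [if_pos hc, if_pos hc]
        have hset : PySem.List.pySetD (init ++ [(c, k)]) (init.length : Int) (c, k + 1)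
            = init ++ [(c, k + 1)] := by
          rw [PySem.List.pySetD_natCast]
          have h0 : init.length = init.length + 0 := by omega
          rw [h0, List.set_append_right _ _ (by omega)]
          simp
        rw [hset, pvChunks_cons (a :: t) l (by simp) hl, pvAbsorb_cons, if_pos hc.symm]
        exact ih ((a :: t).drop l.toNat) l init c (k + 1) hl hdroplen
      · rw [if_neg hc, if_neg hc]
        have hlen : init.length + 1 = (init ++ [(c, k)]).length := by simp
        rw [hlen, ih ((a :: t).drop l.toNat) l (init ++ [(c, k)]) (List.take l.toNat (a :: t)) 1 hl hdroplen]
        rw [pvChunks_cons (a :: t) l (by simp) hl, pvAbsorb_cons, if_neg (fun h => hc h.symm)]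
        simp

theorem pvLoopA_groups (s : List Char) (l : Int) (hl : 1 ≤ l) :
    pvLoopA s.length s l [] 0 = pvGroups (pvChunks s l) := by
  cases s with
  | nil => simp [pvLoopA, pvChunks_nil, pvGroups]
  | cons a t =>
    rw [show (a :: t).length = t.length + 1 from rfl, pvLoopA]
    rw [if_pos (by simp)]
    simp only [pvFirst_eq (a :: t) l hl]
    simp only [if_true]
    have hdroplen : ((a :: t).drop l.toNat).length ≤ t.length := by
      simp only [List.length_drop]
      have : 1 ≤ l.toNat := by omega
      simp; omega
    have h0 : ([((List.take l.toNat (a :: t)), (1 : Int))] : List (List Char × Int))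
        = [] ++ [((List.take l.toNat (a :: t)), (1 : Int))] := by simp
    rw [h0]
    have := pvLoopA_absorb t.length ((a :: t).drop l.toNat) l []
      (List.take l.toNat (a :: t)) 1 hl hdroplen
    simp only [List.length_nil] at this
    rw [this]
    rw [pvChunks_cons (a :: t) l (by simp) hl, pvGroups_cons]
    simp

-- ===== B side: the range/slice comprehension equals pvChunks =====

theorem pvPyRange_shift (l n : Int) (hl : 0 < l) :
    PySem.List.pyRange l n l = (PySem.List.pyRange 0 (n - l) l).map (· + l) := by
  rw [PySem.List.pyRange_of_pos _ _ hl, PySem.List.pyRange_of_pos _ _ hl, List.map_map]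
  by_cases h : l < n
  · rw [if_pos h, if_pos (by omega)]
    have harg : n - l + l - 1 = n - l - 0 + l - 1 := by ring
    rw [harg]
    apply List.map_congr_left
    intro k _
    simp
    ring
  · rw [if_neg h, if_neg (by omega)]
    simp

theorem pvPyRange_head (l n : Int) (hl : 0 < l) (hn : 0 < n) :
    PySem.List.pyRange 0 n l = 0 :: PySem.List.pyRange l n l := by
  rw [PySem.List.pyRange_of_pos _ _ hl, PySem.List.pyRange_of_pos _ _ hl]
  rw [if_pos (by omega)]
  have harg : n - 0 + l - 1 = (n - 1) + 1 * l := by ring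
  rw [harg, Int.add_mul_ediv_right _ _ (by omega)]
  have hnn : 0 ≤ (n - 1) / l := Int.ediv_nonneg (by omega) (by omega)
  by_cases h : l < n
  · rw [if_pos h]
    have ht : ((n - 1) / l + 1).toNat = ((n - l + l - 1) / l).toNat + 1 := by
      have hh : n - l + l - 1 = n - 1 := by ring
      rw [hh]; omega
    rw [ht, List.range_succ_eq_map, List.map_cons, List.map_map]
    congr 1
    · norm_num
    · apply List.map_congr_left
      intro k _
      simp [Nat.succ_eq_add_one]
      push_cast
      ring
  · rw [if_neg h]
    have hz : (n - 1) / l = 0 := Int.ediv_eq_zero_of_lt (by omega) (by omega)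
    rw [hz]
    simp [List.range_succ_eq_map]

theorem pvChunksB_eq_aux (n : Nat) : ∀ (s : List Char) (l : Int), 1 ≤ l → s.length ≤ n →
    ((PySem.List.pyRange 0 (s.length : Int) l).map
      (fun i => PySem.List.slice s (some i) (some (i + l)))) = pvChunks s l := by
  induction n with
  | zero =>
    intro s l hl hn
    have : s = [] := List.eq_nil_of_length_eq_zero (by omega)
    subst this
    simp [PySem.List.pyRange, pvChunks_nil]
  | succ n ih =>
    intro s l hl hn
    cases hs : s with
    | nil => simp [PySem.List.pyRange, pvChunks_nil]
    | cons a t =>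
      subst hs
      have hpos : (0 : Int) < ((a :: t).length : Int) := by simp
      rw [pvPyRange_head l _ (by omega) hpos, pvPyRange_shift l _ (by omega)]
      rw [List.map_cons, List.map_map]
      have hhead : PySem.List.slice (a :: t) (some 0) (some (0 + l))
          = (a :: t).take l.toNat := by
        rw [PySem.List.slice_toNat _ (by omega) (by omega)]
        simp
      have htail : ((PySem.List.pyRange 0 (((a :: t).length : Int) - l) l).map
            ((fun i => PySem.List.slice (a :: t) (some i) (some (i + l))) ∘ (· + l)))
          = (PySem.List.pyRange 0 ((((a :: t).drop l.toNat).length : Int)) l).map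
            (fun i => PySem.List.slice ((a :: t).drop l.toNat) (some i) (some (i + l))) := by
        by_cases hle : l ≤ ((a :: t).length : Int)
        · have hb : (((a :: t).length : Int) - l) = ((((a :: t).drop l.toNat).length : Int)) := by
            simp only [List.length_drop, List.length_cons] at hle ⊢
            omega
          rw [← hb]
          apply List.map_congr_left
          intro i hi
          have hi0 : 0 ≤ i := by
            rcases (PySem.List.mem_pyRange_iff_of_pos (by omega) i).mp hi with ⟨h1, _, _⟩
            omega
          simp only [Function.comp]
          rw [PySem.List.slice_toNat _ (by omega) (by omega),
            PySem.List.slice_toNat _ (by omega) (by omega), List.drop_drop]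
          congr 1
          · omega
          · congr 1
            omega
        · have hd : ((a :: t).drop l.toNat).length = 0 := by
            simp only [List.length_drop, List.length_cons] at hle ⊢
            omega
          rw [hd]
          rw [PySem.List.pyRange_of_pos _ _ (show (0:Int) < l by omega),
            PySem.List.pyRange_of_pos _ _ (show (0:Int) < l by omega)]
          rw [if_neg (by omega), if_neg (by omega)]
          simp
      rw [hhead, htail, ih ((a :: t).drop l.toNat) l hl (by simp only [List.length_drop, List.length_cons] at hn ⊢; omega)]
      rw [pvChunks_cons (a :: t) l (by simp) hl]

theorem pvChunksB_eq (s : List Char) (l : Int) (hl : 1 ≤ l) :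
    ((PySem.List.pyRange 0 (s.length : Int) l).map
      (fun i => PySem.List.slice s (some i) (some (i + l)))) = pvChunks s l :=
  pvChunksB_eq_aux s.length s l hl (le_refl _)

-- ===== B side: pvRuns formats pvGroups =====

theorem pvAbsorb_innerRun (xs : List (List Char)) : ∀ (c : List Char) (k : Int),
    pvAbsorb c k xs = (c, k - 1 + (pvInnerRun c xs).1) :: pvGroups (pvInnerRun c xs).2 := by
  induction xs with
  | nil =>
    intro c k
    have hk : k - 1 + 1 = k := by ring
    simp [pvAbsorb, pvInnerRun, pvGroups, hk]
  | cons x t ih =>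
    intro c k
    by_cases h : x = c
    · rw [pvAbsorb_cons, if_pos h, ih c (k + 1),
        show pvInnerRun c (x :: t) = ((pvInnerRun c t).1 + 1, (pvInnerRun c t).2) from by
          simp [pvInnerRun, h]]
      have hk : k + 1 - 1 + (pvInnerRun c t).1 = k - 1 + ((pvInnerRun c t).1 + 1) := by ring
      rw [hk]
    · rw [pvAbsorb_cons, if_neg h,
        show pvInnerRun c (x :: t) = (1, x :: t) from by simp [pvInnerRun, h]]
      rw [pvGroups_cons]
      have hk : k - 1 + 1 = k := by ring
      rw [hk]

theorem pvRuns_eq_groups_aux (n : Nat) : ∀ (cs : List (List Char)), cs.length ≤ n →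
    pvRuns cs = (pvGroups cs).map (fun wc => PySem.Int.toChars wc.2 ++ wc.1) := by
  induction n with
  | zero =>
    intro cs hn
    have : cs = [] := List.eq_nil_of_length_eq_zero (by omega)
    subst this
    simp [pvRuns, pvGroups]
  | succ n ih =>
    intro cs hn
    cases cs with
    | nil => simp [pvRuns, pvGroups]
    | cons c rest =>
      rw [pvRuns, pvGroups, pvAbsorb_innerRun rest c 1]
      have hk : (1 : Int) - 1 + (pvInnerRun c rest).1 = (pvInnerRun c rest).1 := by ring
      rw [hk, List.map_cons]
      have hlen : (pvInnerRun c rest).2.length ≤ n := by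
        have := pvInnerRun_length_le c rest
        simp at hn
        omega
      rw [ih (pvInnerRun c rest).2 hlen]

theorem pvRuns_eq_groups (cs : List (List Char)) :
    pvRuns cs = (pvGroups cs).map (fun wc => PySem.Int.toChars wc.2 ++ wc.1) :=
  pvRuns_eq_groups_aux cs.length cs (le_refl _)

-- ===== assembling the result string =====

theorem pvJoin_cons (x : List Char) (xs : List (List Char)) :
    PySem.Chars.join [] (x :: xs) = x ++ PySem.Chars.join [] xs := by
  cases xs <;> simp [PySem.Chars.join, List.intercalate]

theorem pvFoldl_join (gs : List (List Char × Int)) : ∀ (init : List Char),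
    gs.foldl (fun r wc => r ++ PySem.Int.toChars wc.2 ++ wc.1) init
      = init ++ PySem.Chars.join [] (gs.map (fun wc => PySem.Int.toChars wc.2 ++ wc.1)) := by
  induction gs with
  | nil => intro init; simp [PySem.Chars.join, List.intercalate]
  | cons g t ih =>
    intro init
    rw [List.foldl_cons, ih, List.map_cons, pvJoin_cons]
    simp

-- ===== VERDICT (by name: the statement is the Claim_ definition above) =====
theorem make_zip_spec : Claim_equal_make_zip := by
  intro s l _ hpre
  unfold Spec_make_zip
  simp only [make_zip, make_zip_alt]
  by_cases hs : s.toList = []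
  · have hr : PySem.List.pyRange 0 0 l = [] := by
      simp [PySem.List.pyRange]
    simp [hs, hr, pvLoopA, pvRuns]
  · have hl : 1 ≤ l := by
      rcases hpre with h | h
      · exact h
      · exact absurd (by rw [h.1]; rfl) hs
    rw [pvChunksB_eq s.toList l hl, pvLoopA_groups s.toList l hl,
      pvRuns_eq_groups, pvFoldl_join]
    simp
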